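-- pv_equiv track=rewrite | github.com/sfc-gh-samaurer/Sam-Maurer-s-SnowWork-Skills-and-Files | skills/semantic-extraction-skill/modules/denodo/vql_parser.py | _find_keyword_boundary
-- ===== SOURCE A (Python) =====
-- def _find_keyword_boundary(sql: str, keyword: str, start: int = 0) -> int:
--     """Return the index of *keyword* at paren/quote depth 0, or -1.
--
--     Skips occurrences inside single-quoted strings, double-quoted identifiers,
--     and parenthesised expressions (subqueries / function calls).
--     """
--     kw_upper = keyword.upper()
--     kw_len = len(keyword)
--     depth = 0
--     in_single = False
--     in_double = False
--     i = start
--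
--     while i < len(sql):
--         ch = sql[i]
--         if ch == "'" and not in_double:
--             in_single = not in_single
--         elif ch == '"' and not in_single:
--             in_double = not in_double
--         elif not in_single and not in_double:
--             if ch == "(":
--                 depth += 1
--             elif ch == ")":
--                 depth = max(0, depth - 1)
--             elif depth == 0 and sql[i : i + kw_len].upper() == kw_upper:
--                 pre = sql[i - 1] if i > 0 else " "
--                 post = sql[i + kw_len] if i + kw_len < len(sql) else " "
--                 if not (pre.isalnum() or pre == "_") and not (
--                     post.isalnum() or post == "_"
--                 ):
--                     return i
--         i += 1
--     return -1
-- ===== SOURCE B (Python) =====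
-- def _step(state, i, ch):
--     """Fold step of the quote/paren state machine.
--
--     state = ((depth, in_single, in_double), candidate_positions); a position is a
--     candidate when it is at depth 0, outside quotes, and not a special char."""
--     (depth, in_s, in_d), cands = state
--     if ch == "'" and not in_d:
--         return ((depth, not in_s, in_d), cands)
--     if ch == '"' and not in_s:
--         return ((depth, in_s, not in_d), cands)
--     if in_s or in_d:
--         return state
--     if ch == "(":
--         return ((depth + 1, in_s, in_d), cands)
--     if ch == ")":
--         return ((max(0, depth - 1), in_s, in_d), cands)
--     if depth == 0:
--         cands.append(i)
--     return state
--
--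
-- def _find_keyword_boundary(sql: str, keyword: str, start: int = 0) -> int:
--     """Staged version: fold the state machine over the index range to collect
--     candidate positions, then return the first candidate that is a
--     word-boundary occurrence of the keyword."""
--     kw_upper = keyword.upper()
--     kw_len = len(keyword)
--     n = len(sql)
--
--     state = ((0, False, False), [])
--     for i in range(start, n):
--         state = _step(state, i, sql[i])
--     cands = state[1]
--
--     def ok(i):
--         if sql[i:i + kw_len].upper() != kw_upper:
--             return False
--         pre = sql[i - 1] if i > 0 else " "
--         post = sql[i + kw_len] if i + kw_len < n else " "
--         return not (pre.isalnum() or pre == "_") and not (post.isalnum() or post == "_")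
--
--     return next((i for i in cands if ok(i)), -1)
-- ===== Notes on version B (the rewrite author's own statement) =====
-- stated objective: alternative
-- what changed: Replaced A's single interleaved while-loop (state machine plus in-place keyword matching with early return) by two staged passes: a fold of a separate step function over the index range that only collects candidate positions, followed by a first-match search (next over a generator) of that candidate list with the word-boundary test; all matching logic moves out of the scan.
import Mathlib
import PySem

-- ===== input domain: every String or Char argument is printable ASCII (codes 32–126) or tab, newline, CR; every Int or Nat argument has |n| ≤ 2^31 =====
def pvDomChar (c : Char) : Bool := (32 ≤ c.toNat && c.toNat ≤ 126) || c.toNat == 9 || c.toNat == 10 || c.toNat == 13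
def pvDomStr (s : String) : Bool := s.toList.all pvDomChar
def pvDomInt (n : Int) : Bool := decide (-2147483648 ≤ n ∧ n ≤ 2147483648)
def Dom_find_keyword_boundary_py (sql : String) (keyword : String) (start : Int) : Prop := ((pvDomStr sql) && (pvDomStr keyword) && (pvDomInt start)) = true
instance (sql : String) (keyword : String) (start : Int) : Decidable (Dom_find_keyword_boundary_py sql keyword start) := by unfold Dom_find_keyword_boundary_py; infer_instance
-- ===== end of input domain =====

-- B replaces A's single interleaved while-loop by two staged passes — a fold of a separate
-- step function over the index range that only collects candidate positions, then a
-- first-match search of that list — a different decomposition (objective: alternative).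

-- shared atomic helpers (the same expressions both Pythons contain)
def pvIsWord (c : Char) : Bool := PySem.Chars.isalnum c || c == '_'

-- pre/post boundary characters (space when out of bounds, as in both Pythons)
def pvPre (s : List Char) (i : Int) : Char :=
  if 0 < i then (PySem.List.pyGet? s (i - 1)).getD ' ' else ' '
def pvPost (s : List Char) (kwLen : Nat) (i : Int) : Char :=
  if i + (kwLen : Int) < (s.length : Int) then (PySem.List.pyGet? s (i + (kwLen : Int))).getD ' ' else ' '

-- ===== PORT A =====
-- A's while loop: i walks from start to len(sql); fuel (len - start).toNat counts the remaining
-- iterations.  pyGet? = none is where Python raises IndexError (excluded by Pre_); -1 there.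
def pvLoopA (s : List Char) (kwU : List Char) (kwLen : Nat) :
    Nat → Int → Int → Bool → Bool → Int
  | 0, _, _, _, _ => -1
  | fuel + 1, i, depth, inS, inD =>
    if i < (s.length : Int) then
      match PySem.List.pyGet? s i with
      | none => -1
      | some ch =>
        if ch = '\'' ∧ inD = false then pvLoopA s kwU kwLen fuel (i + 1) depth (!inS) inD
        else if ch = '"' ∧ inS = false then pvLoopA s kwU kwLen fuel (i + 1) depth inS (!inD)
        else if inS = false ∧ inD = false then
          if ch = '(' then pvLoopA s kwU kwLen fuel (i + 1) (depth + 1) inS inD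
          else if ch = ')' then pvLoopA s kwU kwLen fuel (i + 1) (max 0 (depth - 1)) inS inD
          else if depth = 0 ∧ PySem.Chars.upper (PySem.List.slice s (some i) (some (i + (kwLen : Int)))) = kwU then
            if pvIsWord (pvPre s i) = false ∧ pvIsWord (pvPost s kwLen i) = false then i
            else pvLoopA s kwU kwLen fuel (i + 1) depth inS inD
          else pvLoopA s kwU kwLen fuel (i + 1) depth inS inD
        else pvLoopA s kwU kwLen fuel (i + 1) depth inS inD
    else -1

def find_keyword_boundary_py (sql : String) (keyword : String) (start : Int) : Int :=
  pvLoopA sql.toList (PySem.Chars.upper keyword.toList) keyword.toList.length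
    ((sql.toList.length - start).toNat) start 0 false false

-- ===== PORT B =====
-- Source B's _step: one fold step of the state machine; state = ((depth, in_single, in_double), cands)
def pvScanStep (s : List Char) (st : (Int × Bool × Bool) × List Int) (i : Int) :
    (Int × Bool × Bool) × List Int :=
  match PySem.List.pyGet? s i with
  | none => st   -- unreachable inside Pre_ (Python raises IndexError before this point)
  | some ch =>
    let depth := st.1.1; let inS := st.1.2.1; let inD := st.1.2.2; let cands := st.2
    if ch = '\'' ∧ inD = false then ((depth, !inS, inD), cands)
    else if ch = '"' ∧ inS = false then ((depth, inS, !inD), cands)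
    else if inS = true ∨ inD = true then st
    else if ch = '(' then ((depth + 1, inS, inD), cands)
    else if ch = ')' then ((max 0 (depth - 1), inS, inD), cands)
    else if depth = 0 then ((depth, inS, inD), cands ++ [i])
    else st

-- Source B's ok(i): word-boundary keyword match at i
def pvOkB (s : List Char) (kwU : List Char) (kwLen : Nat) (i : Int) : Bool :=
  if PySem.Chars.upper (PySem.List.slice s (some i) (some (i + (kwLen : Int)))) ≠ kwU then false
  else !pvIsWord (pvPre s i) && !pvIsWord (pvPost s kwLen i)

def find_keyword_boundary_py_alt (sql : String) (keyword : String) (start : Int) : Int :=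
  let s := sql.toList
  let cands := ((PySem.List.pyRange start (s.length : Int) 1).foldl (pvScanStep s)
      ((0, false, false), [])).2
  ((cands.find? (pvOkB s (PySem.Chars.upper keyword.toList) keyword.toList.length)).getD (-1))

-- ===== PRECONDITION & SPEC =====
-- Pre_ excludes exactly the inputs where the Python raises IndexError: start < -len(sql)
-- makes the access sql[start] fall outside even Python's negative-index range.
def Pre_find_keyword_boundary_py (sql : String) (keyword : String) (start : Int) : Prop :=
  -(sql.length : Int) ≤ start
instance (sql : String) (keyword : String) (start : Int) : Decidable (Pre_find_keyword_boundary_py sql keyword start) := by unfold Pre_find_keyword_boundary_py; infer_instance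

def pvWitness_find_keyword_boundary_py : String × String × Int := ("a AND b", "and", 0)

def Spec_find_keyword_boundary_py (sql : String) (keyword : String) (start : Int) (out : Int) : Prop := out = find_keyword_boundary_py_alt sql keyword start
instance (sql : String) (keyword : String) (start : Int) (out : Int) : Decidable (Spec_find_keyword_boundary_py sql keyword start out) := by unfold Spec_find_keyword_boundary_py; infer_instance

-- ===== CLAIM (what is proved, stated in full; the proofs are below) =====
def Claim_equal_find_keyword_boundary_py : Prop := ∀ (sql : String) (keyword : String) (start : Int), Dom_find_keyword_boundary_py sql keyword start → Pre_find_keyword_boundary_py sql keyword start → Spec_find_keyword_boundary_py sql keyword start (find_keyword_boundary_py sql keyword start)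

-- ===== LEMMAS AND PROOFS =====

-- Proof-side bridge: the candidate positions, in A's recursion shape.
def pvCandsB (s : List Char) :
    Nat → Int → Int → Bool → Bool → List Int
  | 0, _, _, _, _ => []
  | fuel + 1, i, depth, inS, inD =>
    if i < (s.length : Int) then
      match PySem.List.pyGet? s i with
      | none => []
      | some ch =>
        if ch = '\'' ∧ inD = false then pvCandsB s fuel (i + 1) depth (!inS) inD
        else if ch = '"' ∧ inS = false then pvCandsB s fuel (i + 1) depth inS (!inD)
        else if inS = false ∧ inD = false then
          if ch = '(' then pvCandsB s fuel (i + 1) (depth + 1) inS inD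
          else if ch = ')' then pvCandsB s fuel (i + 1) (max 0 (depth - 1)) inS inD
          else if depth = 0 then i :: pvCandsB s fuel (i + 1) depth inS inD
          else pvCandsB s fuel (i + 1) depth inS inD
        else pvCandsB s fuel (i + 1) depth inS inD
    else []

-- Proof-side bridge: first candidate passing pvOkB, in recursive shape.
def pvFindB (s : List Char) (kwU : List Char) (kwLen : Nat) : List Int → Int
  | [] => -1
  | c :: cs => if pvOkB s kwU kwLen c then c else pvFindB s kwU kwLen cs

-- A's interleaved loop computes exactly "first pvOkB among the candidate positions".
lemma pvLoopA_eq_findB (s kwU : List Char) (kwLen : Nat) :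
    ∀ (fuel : Nat) (i depth : Int) (inS inD : Bool),
      pvLoopA s kwU kwLen fuel i depth inS inD =
        pvFindB s kwU kwLen (pvCandsB s fuel i depth inS inD) := by
  intro fuel
  induction fuel with
  | zero => intro i depth inS inD; simp [pvLoopA, pvCandsB, pvFindB]
  | succ n ih =>
    intro i depth inS inD
    rw [pvLoopA, pvCandsB]
    by_cases hlt : i < (s.length : Int)
    · simp only [hlt, if_true]
      cases hg : PySem.List.pyGet? s i with
      | none => simp [pvFindB]
      | some ch =>
        by_cases h1 : ch = '\'' ∧ inD = false
        · simp [h1, ih]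
        by_cases h2 : ch = '"' ∧ inS = false
        · simp [h2, ih]
        by_cases h3 : inS = false ∧ inD = false
        · obtain ⟨hS, hD⟩ := h3
          subst hS; subst hD
          have hq1 : ¬ ch = '\'' := fun h => h1 ⟨h, rfl⟩
          have hq2 : ¬ ch = '"' := fun h => h2 ⟨h, rfl⟩
          by_cases h4 : ch = '('
          · simp [h4, ih]
          by_cases h5 : ch = ')'
          · simp [h5, ih]
          by_cases h6 : depth = 0
          · simp only [hq1, hq2, h4, h5, h6, and_true, true_and, if_true,
              if_neg, not_false_eq_true, pvFindB, pvOkB]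
            by_cases hsl : PySem.Chars.upper (PySem.List.slice s (some i) (some (i + (kwLen : Int)))) = kwU
            · by_cases hb : pvIsWord (pvPre s i) = false ∧ pvIsWord (pvPost s kwLen i) = false
              · simp [hsl, hb.1, hb.2]
              · simp only [hsl, if_true, not_true_eq_false, if_false, ne_eq, not_false_eq_true]
                rcases Bool.eq_false_or_eq_true (pvIsWord (pvPre s i)) with hp | hp <;>
                rcases Bool.eq_false_or_eq_true (pvIsWord (pvPost s kwLen i)) with hq | hq <;>
                  simp [hp, hq, ih] at hb ⊢
            · simp [hsl, ih]
          · simp [hq1, hq2, h4, h5, h6, ih]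
        · simp [h1, h2, h3, ih]
    · simp [hlt, pvFindB]

-- B's fold over the index range collects exactly pvCandsB (appended to the accumulator).
lemma pvFoldl_eq_cands (s : List Char) :
    ∀ (fuel : Nat) (i depth : Int) (inS inD : Bool) (acc : List Int),
      -(s.length : Int) ≤ i → fuel = ((s.length : Int) - i).toNat →
      ((PySem.List.pyRange i (s.length : Int) 1).foldl (pvScanStep s) ((depth, inS, inD), acc)).2
        = acc ++ pvCandsB s fuel i depth inS inD := by
  intro fuel
  induction fuel with
  | zero =>
    intro i depth inS inD acc hge hf
    have hle : (s.length : Int) ≤ i := by omega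
    rw [PySem.List.pyRange_one_eq_nil hle]
    simp [pvCandsB]
  | succ n ih =>
    intro i depth inS inD acc hge hf
    have hlt : i < (s.length : Int) := by omega
    rw [PySem.List.pyRange_one_cons hlt, List.foldl_cons, pvCandsB]
    have hf' : n = ((s.length : Int) - (i + 1)).toNat := by omega
    have hge' : -(s.length : Int) ≤ i + 1 := by omega
    have hin : PySem.Raise.InRange s.length i := by
      unfold PySem.Raise.InRange; omega
    simp only [hlt, if_true]
    cases hg : PySem.List.pyGet? s i with
    | none =>
      exact absurd ((PySem.List.pyGet?_eq_none_iff _ _).mp hg) (by simpa using hin)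
    | some ch =>
      by_cases h1 : ch = '\'' ∧ inD = false
      · have hstep : pvScanStep s ((depth, inS, inD), acc) i = ((depth, !inS, inD), acc) := by
          simp [pvScanStep, hg, h1]
        rw [hstep, ih _ _ _ _ _ hge' hf']
        simp [h1]
      by_cases h2 : ch = '"' ∧ inS = false
      · have hstep : pvScanStep s ((depth, inS, inD), acc) i = ((depth, inS, !inD), acc) := by
          simp [pvScanStep, hg, h1, h2]
        rw [hstep, ih _ _ _ _ _ hge' hf']
        simp [h1, h2]
      by_cases h3 : inS = false ∧ inD = false
      · obtain ⟨hS, hD⟩ := h3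
        subst hS; subst hD
        have hq1 : ¬ ch = '\'' := fun h => h1 ⟨h, rfl⟩
        have hq2 : ¬ ch = '"' := fun h => h2 ⟨h, rfl⟩
        by_cases h4 : ch = '('
        · have hstep : pvScanStep s ((depth, false, false), acc) i = ((depth + 1, false, false), acc) := by
            simp [pvScanStep, hg, hq1, hq2, h4]
          rw [hstep, ih _ _ _ _ _ hge' hf']
          simp [hq1, hq2, h4]
        by_cases h5 : ch = ')'
        · have hstep : pvScanStep s ((depth, false, false), acc) i = ((max 0 (depth - 1), false, false), acc) := by
            simp [pvScanStep, hg, hq1, hq2, h4, h5]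
          rw [hstep, ih _ _ _ _ _ hge' hf']
          simp [hq1, hq2, h4, h5]
        by_cases h6 : depth = 0
        · have hstep : pvScanStep s ((depth, false, false), acc) i = ((depth, false, false), acc ++ [i]) := by
            simp [pvScanStep, hg, hq1, hq2, h4, h5, h6]
          rw [hstep, ih _ _ _ _ _ hge' hf']
          simp [hq1, hq2, h4, h5, h6]
        · have hstep : pvScanStep s ((depth, false, false), acc) i = ((depth, false, false), acc) := by
            simp [pvScanStep, hg, hq1, hq2, h4, h5, h6]
          rw [hstep, ih _ _ _ _ _ hge' hf']
          simp [hq1, hq2, h4, h5, h6]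
      · have hor : inS = true ∨ inD = true := by
          by_cases h : inS = true
          · exact Or.inl h
          · have hS : inS = false := by simpa using h
            by_cases hd : inD = true
            · exact Or.inr hd
            · exact absurd ⟨hS, by simpa using hd⟩ h3
        have hstep : pvScanStep s ((depth, inS, inD), acc) i = ((depth, inS, inD), acc) := by
          simp [pvScanStep, hg, h1, h2, hor]
        rw [hstep, ih _ _ _ _ _ hge' hf']
        simp [h1, h2, h3]

-- The recursive first-match equals find?.getD (-1).
lemma pvFindB_eq_find? (s kwU : List Char) (kwLen : Nat) :
    ∀ (l : List Int), pvFindB s kwU kwLen l = ((l.find? (pvOkB s kwU kwLen)).getD (-1)) := by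
  intro l
  induction l with
  | nil => simp [pvFindB]
  | cons c cs ih =>
    rw [pvFindB, List.find?]
    by_cases h : pvOkB s kwU kwLen c = true
    · simp [h]
    · simp only [Bool.not_eq_true] at h
      simp [h, ih]

-- ===== VERDICT (by name: the statement is the Claim_ definition above) =====
theorem find_keyword_boundary_py_spec : Claim_equal_find_keyword_boundary_py := by
  intro sql keyword start _ hpre
  unfold Spec_find_keyword_boundary_py find_keyword_boundary_py find_keyword_boundary_py_alt
  rw [pvLoopA_eq_findB, pvFindB_eq_find?]
  have h := pvFoldl_eq_cands sql.toList ((sql.toList.length : Int) - start).toNat start 0 false false [] (by simpa [Pre_find_keyword_boundary_py] using hpre) rfl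
  simp only [h, List.nil_append]
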